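-- pv_equiv track=rewrite | github.com/wzzlcss/GCEPNet | GEPNet/GEPNet_data.py | get_idx_dicts
-- ===== SOURCE A (Python) =====
-- def get_idx_dicts(user_num):
--     #slicing parameters
--     temp_a=[]
--     temp_b=[]
--     dict_index_val = {}
--     dict_val_index = {}
--     dict_final = {}
--     for i in range(user_num):
--         for j in range(user_num):
--             if  i!=j:
--                 temp_a.append(i)
--                 temp_b.append(j)
--                 dict_final[len(temp_a)-1]=  str(j) + str(i)
--                 dict_index_val[len(temp_a)-1] = str(i) + str(j)
--                 dict_val_index[str(i) + str(j)] = len(temp_a)-1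
--     return temp_a,temp_b
-- ===== SOURCE B (Python) =====
-- def get_idx_dicts(user_num):
--     # Block construction: for each i, append user_num-1 copies of i and all j != i in order.
--     temp_a = []
--     temp_b = []
--     for i in range(user_num):
--         temp_a += [i] * (user_num - 1)
--         temp_b += list(range(i)) + list(range(i + 1, user_num))
--     return temp_a, temp_b
-- ===== Notes on version B (the rewrite author's own statement) =====
-- stated objective: simpler
-- what changed: B drops the three unused dicts and builds the pair lists by whole blocks per i (replication and two range slices) instead of elementwise j-loop filtering with i!=j.
import Mathlib
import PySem

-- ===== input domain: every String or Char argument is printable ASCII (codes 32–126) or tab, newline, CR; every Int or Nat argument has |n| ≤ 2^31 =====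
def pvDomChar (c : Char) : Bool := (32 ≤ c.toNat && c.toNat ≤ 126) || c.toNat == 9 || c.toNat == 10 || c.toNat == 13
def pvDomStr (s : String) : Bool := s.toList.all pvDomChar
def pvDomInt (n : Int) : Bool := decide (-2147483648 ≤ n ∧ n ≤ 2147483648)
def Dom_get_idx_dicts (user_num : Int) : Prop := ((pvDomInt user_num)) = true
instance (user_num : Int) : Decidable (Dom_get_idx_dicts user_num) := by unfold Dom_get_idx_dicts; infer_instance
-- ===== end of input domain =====

-- B drops the three unused dicts and builds both index lists by whole blocks per i
-- (replication + two range slices) instead of elementwise i!=j filtering: simpler, same order.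


-- ===== PORT A =====
-- state: (temp_a, temp_b, dict_index_val, dict_val_index, dict_final)
def pvStA : Type := List Int × List Int × PySem.Dict Int String × PySem.Dict String Int × PySem.Dict Int String

def pvInnerA (i : Int) (st : pvStA) (j : Int) : pvStA :=
  if i ≠ j then
    let temp_a := st.1 ++ [i]
    let temp_b := st.2.1 ++ [j]
    let dict_final := st.2.2.2.2.insert ((temp_a.length : Int) - 1) (PySem.Int.toStr j ++ PySem.Int.toStr i)
    let dict_index_val := st.2.2.1.insert ((temp_a.length : Int) - 1) (PySem.Int.toStr i ++ PySem.Int.toStr j)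
    let dict_val_index := st.2.2.2.1.insert (PySem.Int.toStr i ++ PySem.Int.toStr j) ((temp_a.length : Int) - 1)
    (temp_a, temp_b, dict_index_val, dict_val_index, dict_final)
  else st

def get_idx_dicts (user_num : Int) : List Int × List Int :=
  let st :=
    (PySem.List.pyRange 0 user_num 1).foldl
      (fun st i => (PySem.List.pyRange 0 user_num 1).foldl (pvInnerA i) st)
      ([], [], PySem.Dict.empty, PySem.Dict.empty, PySem.Dict.empty)
  (st.1, st.2.1)

-- ===== PORT B =====
def get_idx_dicts_alt (user_num : Int) : List Int × List Int :=
  (PySem.List.pyRange 0 user_num 1).foldl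
    (fun acc i =>
      (acc.1 ++ List.replicate (user_num - 1).toNat i,
       acc.2 ++ (PySem.List.pyRange 0 i 1 ++ PySem.List.pyRange (i + 1) user_num 1)))
    ([], [])

-- ===== PRECONDITION & SPEC =====
def Spec_get_idx_dicts (user_num : Int) (out : List Int × List Int) : Prop := out = get_idx_dicts_alt user_num
instance (user_num : Int) (out : List Int × List Int) : Decidable (Spec_get_idx_dicts user_num out) := by unfold Spec_get_idx_dicts; infer_instance

-- ===== CLAIM (what is proved, stated in full; the proofs are below) =====
def Claim_equal_get_idx_dicts : Prop := ∀ (user_num : Int), Dom_get_idx_dicts user_num → Spec_get_idx_dicts user_num (get_idx_dicts user_num)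

-- ===== LEMMAS AND PROOFS =====

-- the inner j-loop, projected onto (temp_a, temp_b): elementwise filtering
lemma pv_inner_proj (i : Int) (l : List Int) (st : pvStA) :
    ((l.foldl (pvInnerA i) st).1, (l.foldl (pvInnerA i) st).2.1)
      = (st.1 ++ List.replicate (l.filter (fun j => !decide (i = j))).length i,
         st.2.1 ++ l.filter (fun j => !decide (i = j))) := by
  induction l generalizing st with
  | nil => simp
  | cons j t ih =>
    by_cases h : i = j
    · subst h
      have hst : pvInnerA i st i = st := by simp [pvInnerA]
      simp only [List.foldl_cons, hst, ih st, List.filter_cons]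
      simp
    · simp [pvInnerA, h, ih, List.replicate_succ]

-- range(n) with i removed is range(i) ++ range(i+1, n)
lemma pv_filter_range (n i : Int) (h0 : 0 ≤ i) (h1 : i < n) :
    (PySem.List.pyRange 0 n 1).filter (fun j => !decide (i = j))
      = PySem.List.pyRange 0 i 1 ++ PySem.List.pyRange (i + 1) n 1 := by
  rw [PySem.List.pyRange_one_append 0 i n h0 (le_of_lt h1),
      PySem.List.pyRange_one_cons h1, List.filter_append, List.filter_cons]
  have e1 : (PySem.List.pyRange 0 i 1).filter (fun j => !decide (i = j)) = PySem.List.pyRange 0 i 1 := by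
    apply List.filter_eq_self.mpr
    intro j hj
    have := (PySem.List.mem_pyRange_one).mp hj
    simp only [Bool.not_eq_true', decide_eq_false_iff_not]
    omega
  have e2 : (PySem.List.pyRange (i + 1) n 1).filter (fun j => !decide (i = j)) = PySem.List.pyRange (i + 1) n 1 := by
    apply List.filter_eq_self.mpr
    intro j hj
    have := (PySem.List.mem_pyRange_one).mp hj
    simp only [Bool.not_eq_true', decide_eq_false_iff_not]
    omega
  rw [e1, e2]
  simp

lemma pv_filter_len (n i : Int) (h0 : 0 ≤ i) (h1 : i < n) :
    ((PySem.List.pyRange 0 n 1).filter (fun j => !decide (i = j))).length = (n - 1).toNat := by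
  rw [pv_filter_range n i h0 h1]
  simp [PySem.List.length_pyRange_one]
  omega

-- the whole of A, projected onto (temp_a, temp_b), is B's fold
lemma pv_outer_proj (n : Int) (L : List Int) (hL : ∀ i ∈ L, 0 ≤ i ∧ i < n) (st : pvStA) :
    ((L.foldl (fun st i => (PySem.List.pyRange 0 n 1).foldl (pvInnerA i) st) st).1,
     (L.foldl (fun st i => (PySem.List.pyRange 0 n 1).foldl (pvInnerA i) st) st).2.1)
      = L.foldl
          (fun acc i =>
            (acc.1 ++ List.replicate (n - 1).toNat i,
             acc.2 ++ (PySem.List.pyRange 0 i 1 ++ PySem.List.pyRange (i + 1) n 1)))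
          (st.1, st.2.1) := by
  induction L generalizing st with
  | nil => simp
  | cons i t ih =>
    obtain ⟨h0, h1⟩ := hL i (List.mem_cons_self ..)
    simp only [List.foldl_cons]
    rw [ih (fun j hj => hL j (List.mem_cons_of_mem _ hj))]
    have hp := pv_inner_proj i (PySem.List.pyRange 0 n 1) st
    have ha : (((PySem.List.pyRange 0 n 1).foldl (pvInnerA i) st).1) = st.1 ++ List.replicate (n - 1).toNat i := by
      have := congrArg Prod.fst hp
      rw [pv_filter_len n i h0 h1] at this
      simpa using this
    have hb : (((PySem.List.pyRange 0 n 1).foldl (pvInnerA i) st).2.1)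
        = st.2.1 ++ (PySem.List.pyRange 0 i 1 ++ PySem.List.pyRange (i + 1) n 1) := by
      have := congrArg Prod.snd hp
      rw [pv_filter_range n i h0 h1] at this
      simpa using this
    rw [ha, hb]

-- ===== VERDICT (by name: the statement is the Claim_ definition above) =====
theorem get_idx_dicts_spec : Claim_equal_get_idx_dicts := by
  intro n _
  unfold Spec_get_idx_dicts get_idx_dicts get_idx_dicts_alt
  exact pv_outer_proj n (PySem.List.pyRange 0 n 1)
    (fun i hi => by have := (PySem.List.mem_pyRange_one).mp hi; omega)
    ([], [], PySem.Dict.empty, PySem.Dict.empty, PySem.Dict.empty)
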